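-- pv_equiv track=rewrite | github.com/leoagea/AdventOfCode | 2025/day2/part1.py | sum_invalid_in_range
-- ===== SOURCE A (Python) =====
-- def sum_invalid_in_range(L: int, R: int) -> int:
-- 	if L > R:
-- 		return 0
--
-- 	total = 0
-- 	max_k = len(str(R)) // 2
--
-- 	for k in range(1, max_k + 1):
-- 		multiplier = 10**k + 1
-- 		min_x = 10**(k - 1)
-- 		max_x = 10**k - 1
--
-- 		low_x = max(min_x, (L + multiplier - 1) // multiplier)
-- 		high_x = min(max_x, R // multiplier)
--
-- 		if low_x <= high_x:
-- 			count = high_x - low_x + 1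
-- 			sum_x = (low_x + high_x) * count // 2
-- 			total += sum_x * multiplier
--
-- 	return total
-- ===== SOURCE B (Python) =====
-- def sum_invalid_in_range(L: int, R: int) -> int:
-- 	total = 0
-- 	for k in range(1, len(str(R)) // 2 + 1):
-- 		multiplier = 10**k + 1
-- 		for x in range(10**(k - 1), 10**k):
-- 			n = x * multiplier
-- 			if L <= n <= R:
-- 				total += n
-- 	return total
-- ===== Notes on version B (the rewrite author's own statement) =====
-- stated objective: simpler
-- what changed: Replaces A's interval-intersection bound computation (ceiling/floor division, max/min clamping, Gauss closed-form sum) and the L>R early return by a direct scan of each k-digit block value x, testing L <= x*(10^k+1) <= R and accumulating; no low/high bounds and no closed-form arithmetic remain.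
import Mathlib
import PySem

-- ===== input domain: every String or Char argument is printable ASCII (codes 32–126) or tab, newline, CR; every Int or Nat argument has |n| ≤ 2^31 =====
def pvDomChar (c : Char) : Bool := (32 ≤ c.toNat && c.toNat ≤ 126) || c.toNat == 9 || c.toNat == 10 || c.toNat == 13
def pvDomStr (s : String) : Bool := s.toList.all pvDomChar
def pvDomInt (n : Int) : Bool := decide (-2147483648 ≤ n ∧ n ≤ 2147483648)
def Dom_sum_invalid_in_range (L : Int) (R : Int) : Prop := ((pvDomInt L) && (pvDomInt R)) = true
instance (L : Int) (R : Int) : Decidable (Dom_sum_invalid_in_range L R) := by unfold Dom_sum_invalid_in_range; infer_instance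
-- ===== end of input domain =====

-- B replaces A's per-block-length bound computation (ceiling/floor division, max/min
-- clamping, Gauss closed-form sum) by a direct scan of every k-digit block value with a
-- range test — simpler, no closed-form arithmetic; not faster.

-- ===== PORT A =====
-- '10**k' for k ≥ 1 (as produced by range(1, …)) is ported as (10:Int) ^ k.toNat — exact there.
def sum_invalid_in_range (L : Int) (R : Int) : Int :=
  if L > R then 0
  else
    (PySem.List.pyRange 1 (PySem.Int.floordiv (PySem.Str.len (PySem.Int.toStr R)) 2 + 1) 1).foldl
      (fun total k =>
        let multiplier : Int := 10 ^ k.toNat + 1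
        let min_x : Int := 10 ^ (k - 1).toNat
        let max_x : Int := 10 ^ k.toNat - 1
        let low_x := max min_x (PySem.Int.floordiv (L + multiplier - 1) multiplier)
        let high_x := min max_x (PySem.Int.floordiv R multiplier)
        if low_x ≤ high_x then
          let count := high_x - low_x + 1
          let sum_x := PySem.Int.floordiv ((low_x + high_x) * count) 2
          total + sum_x * multiplier
        else total) 0

-- ===== PORT B =====
-- same '10**k' convention; the inner loop is range(10**(k-1), 10**k)
def sum_invalid_in_range_alt (L : Int) (R : Int) : Int :=
  (PySem.List.pyRange 1 (PySem.Int.floordiv (PySem.Str.len (PySem.Int.toStr R)) 2 + 1) 1).foldl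
    (fun total k =>
      let multiplier : Int := 10 ^ k.toNat + 1
      (PySem.List.pyRange (10 ^ (k - 1).toNat) (10 ^ k.toNat) 1).foldl
        (fun total x =>
          let n := x * multiplier
          if L ≤ n ∧ n ≤ R then total + n else total) total) 0

-- ===== PRECONDITION & SPEC =====
def Spec_sum_invalid_in_range (L : Int) (R : Int) (out : Int) : Prop := out = sum_invalid_in_range_alt L R
instance (L : Int) (R : Int) (out : Int) : Decidable (Spec_sum_invalid_in_range L R out) := by unfold Spec_sum_invalid_in_range; infer_instance

-- ===== CLAIM (what is proved, stated in full; the proofs are below) =====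
def Claim_equal_sum_invalid_in_range : Prop := ∀ (L : Int) (R : Int), Dom_sum_invalid_in_range L R → Spec_sum_invalid_in_range L R (sum_invalid_in_range L R)

-- ===== LEMMAS AND PROOFS =====

-- Gauss: twice the sum of the n consecutive integers starting at a
lemma pv_sum_pyRange_mul_two (n : Nat) : ∀ a : Int,
    (PySem.List.pyRange a (a + n) 1).sum * 2 = (2 * a + n - 1) * n := by
  induction n with
  | zero => intro a; simp [PySem.List.pyRange_one_eq_nil]
  | succ n ih =>
    intro a
    have h : a ≤ a + (n : Int) := by omega
    have : (a + (n.succ : Int)) = (a + n) + 1 := by push_cast; ring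
    rw [this, PySem.List.pyRange_one_succ_right h]
    have := ih a
    simp only [List.sum_append, List.sum_cons, List.sum_nil]
    push_cast
    nlinarith [ih a]

-- the range test in B is exactly membership in A's clamped interval [low_x, high_x]
lemma pv_cond_iff (L R m lo0 hi0 x : Int) (hm : 0 < m) (hx1 : lo0 ≤ x) (hx2 : x ≤ hi0) :
    (L ≤ x * m ∧ x * m ≤ R) ↔
      (max lo0 (PySem.Int.floordiv (L + m - 1) m) ≤ x ∧ x ≤ min hi0 (PySem.Int.floordiv R m)) := by
  have h1 : x ≤ PySem.Int.floordiv R m ↔ x * m ≤ R := PySem.Int.le_floordiv_iff_mul_le hm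
  have h2 : x + 1 ≤ PySem.Int.floordiv (L + m - 1) m ↔ (x + 1) * m ≤ L + m - 1 :=
    PySem.Int.le_floordiv_iff_mul_le hm
  have h3 : PySem.Int.floordiv (L + m - 1) m ≤ x ↔ L ≤ x * m := by
    constructor
    · intro h
      by_contra hc
      have : (x + 1) * m ≤ L + m - 1 := by nlinarith
      omega
    · intro h
      by_contra hc
      have : (x + 1) * m ≤ L + m - 1 := h2.mp (by omega)
      nlinarith
  constructor
  · rintro ⟨hL, hR⟩
    exact ⟨max_le hx1 (h3.mpr hL), le_min hx2 (h1.mpr hR)⟩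
  · rintro ⟨hlo, hhi⟩
    exact ⟨h3.mp (le_trans (le_max_right _ _) hlo), h1.mp (le_trans hhi (min_le_right _ _))⟩

-- sum over a range where the guard never holds is zero
lemma pv_sum_zero (a b low high m : Int)
    (h : ∀ x, a ≤ x → x < b → ¬ (low ≤ x ∧ x ≤ high)) :
    (((PySem.List.pyRange a b 1).map (fun x => if low ≤ x ∧ x ≤ high then x * m else 0)).sum) = 0 := by
  apply List.sum_eq_zero
  intro y hy
  rcases List.mem_map.mp hy with ⟨x, hx, rfl⟩
  rcases (PySem.List.mem_pyRange_one).mp hx with ⟨h1, h2⟩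
  simp [h x h1 h2]

-- one iteration of the two outer loops agrees
lemma pv_step_eq (L R m lo0 hi0 acc : Int) (hm : 1 < m) :
    (let low_x := max lo0 (PySem.Int.floordiv (L + m - 1) m)
     let high_x := min hi0 (PySem.Int.floordiv R m)
     if low_x ≤ high_x then
       acc + PySem.Int.floordiv ((low_x + high_x) * (high_x - low_x + 1)) 2 * m
     else acc)
    = (PySem.List.pyRange lo0 (hi0 + 1) 1).foldl
        (fun t x => if L ≤ x * m ∧ x * m ≤ R then t + x * m else t) acc := by
  have hm0 : (0:Int) < m := by omega
  set low := max lo0 (PySem.Int.floordiv (L + m - 1) m) with hlow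
  set high := min hi0 (PySem.Int.floordiv R m) with hhigh
  -- rewrite B's fold into acc + sum of guarded terms
  have hfold : (PySem.List.pyRange lo0 (hi0 + 1) 1).foldl
      (fun t x => if L ≤ x * m ∧ x * m ≤ R then t + x * m else t) acc
      = acc + ((PySem.List.pyRange lo0 (hi0 + 1) 1).map
          (fun x => if L ≤ x * m ∧ x * m ≤ R then x * m else 0)).sum := by
    rw [PySem.List.foldl_congr_mem _ _
        (fun t x => t + (if L ≤ x * m ∧ x * m ≤ R then x * m else 0)) _
        (by intro acc x _; rcases em (L ≤ x * m ∧ x * m ≤ R) with h | h <;> simp [h])]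
    exact PySem.List.foldl_add _ _ _
  rw [hfold]
  have hmap : (PySem.List.pyRange lo0 (hi0 + 1) 1).map
      (fun x => if L ≤ x * m ∧ x * m ≤ R then x * m else 0)
      = (PySem.List.pyRange lo0 (hi0 + 1) 1).map
      (fun x => if low ≤ x ∧ x ≤ high then x * m else 0) := by
    apply List.map_congr_left
    intro x hx
    rcases (PySem.List.mem_pyRange_one).mp hx with ⟨h1, h2⟩
    rw [hlow, hhigh]
    rw [if_congr (pv_cond_iff L R m lo0 hi0 x hm0 h1 (by omega)) rfl rfl]
  rw [hmap]
  by_cases hcase : low ≤ high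
  · -- split the range at low and high+1
    have hb1 : lo0 ≤ low := le_max_left _ _
    have hb2 : high ≤ hi0 := min_le_left _ _
    simp only [hcase, if_true]
    rw [PySem.List.pyRange_one_append lo0 low (hi0 + 1) hb1 (by omega),
        PySem.List.pyRange_one_append low (high + 1) (hi0 + 1) (by omega) (by omega)]
    simp only [List.map_append, List.sum_append]
    rw [pv_sum_zero lo0 low low high m (by intro x _ h2; omega),
        pv_sum_zero (high + 1) (hi0 + 1) low high m (by intro x h1 _; omega)]
    have hmid : ((PySem.List.pyRange low (high + 1) 1).map
        (fun x => if low ≤ x ∧ x ≤ high then x * m else 0)).sum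
        = (PySem.List.pyRange low (high + 1) 1).sum * m := by
      have : (PySem.List.pyRange low (high + 1) 1).map
          (fun x => if low ≤ x ∧ x ≤ high then x * m else 0)
          = (PySem.List.pyRange low (high + 1) 1).map (fun x => x * m) := by
        apply List.map_congr_left
        intro x hx
        rcases (PySem.List.mem_pyRange_one).mp hx with ⟨h1, h2⟩
        have h2' : x ≤ high := by omega
        simp [h1, h2']
      rw [this]
      have hmr := List.sum_map_mul_right (PySem.List.pyRange low (high + 1) 1) id m
      simpa using hmr
    rw [hmid]
    -- Gauss closed form
    have hn : ((high + 1 - low).toNat : Int) = high + 1 - low := by omega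
    have hg := pv_sum_pyRange_mul_two (high + 1 - low).toNat low
    rw [show low + ((high + 1 - low).toNat : Int) = high + 1 by omega] at hg
    have hsum : PySem.Int.floordiv ((low + high) * (high - low + 1)) 2
        = (PySem.List.pyRange low (high + 1) 1).sum := by
      have he : (low + high) * (high - low + 1)
          = (PySem.List.pyRange low (high + 1) 1).sum * 2 := by
        rw [hg, hn]; ring
      rw [he, PySem.Int.floordiv_eq_ediv_of_pos (by omega)]
      omega
    rw [hsum]
    ring
  · -- empty clamped interval: both sides are acc
    simp only [hcase, if_false]
    rw [pv_sum_zero lo0 (hi0 + 1) low high m (by intro x _ _; omega)]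
    ring

-- when L > R the guard in B never fires, so B returns 0 as well
lemma pv_alt_zero (L R : Int) (hLR : R < L) : sum_invalid_in_range_alt L R = 0 := by
  unfold sum_invalid_in_range_alt
  rw [PySem.List.foldl_congr_mem _ _ (fun (total : Int) (_ : Int) => total + 0) _
      (by
        intro acc k _
        simp only []
        rw [PySem.List.foldl_congr_mem _ _ (fun (t : Int) (_ : Int) => t + 0) _
            (by intro t x _; simp only []; rw [if_neg (by rintro ⟨h1, h2⟩; omega)]; ring)]
        rw [PySem.List.foldl_add]
        simp)]
  rw [PySem.List.foldl_add]
  simp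

-- ===== VERDICT (by name: the statement is the Claim_ definition above) =====
theorem sum_invalid_in_range_spec : Claim_equal_sum_invalid_in_range := by
  intro L R _
  unfold Spec_sum_invalid_in_range
  by_cases hLR : L > R
  · rw [sum_invalid_in_range, if_pos hLR, pv_alt_zero L R (by omega)]
  · rw [sum_invalid_in_range, if_neg hLR]
    unfold sum_invalid_in_range_alt
    apply PySem.List.foldl_congr_mem
    intro acc k hk
    rcases (PySem.List.mem_pyRange_one).mp hk with ⟨hk1, _⟩
    simp only []
    have hK : 1 ≤ k.toNat := by omega
    have hme : (1:Int) < 10 ^ k.toNat + 1 := by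
      have : (0:Int) < 10 ^ k.toNat := by positivity
      omega
    have hpow : (10:Int) ^ k.toNat - 1 + 1 = 10 ^ k.toNat := by ring
    have := pv_step_eq L R (10 ^ k.toNat + 1) (10 ^ (k - 1).toNat) (10 ^ k.toNat - 1) acc hme
    rw [hpow] at this
    exact this
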